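-- pv_equiv track=rewrite | github.com/rpuffin/advent-of-code-2024 | Day2.py | check_levels2
-- ===== SOURCE A (Python) =====
-- def check_levels2(report):
-- 	positive_distances = 0
-- 	negative_distances = 0
-- 	unsafe_positive_indices = []
-- 	unsafe_negative_indices = []
--
-- 	for x in range(len(report) - 1):
-- 		distance = report[x + 1] - report[x]
--
-- 		# distance = 0 and distance > 3 are unsafe for both
-- 		if distance == 0 or abs(distance) > 3:
-- 			unsafe_positive_indices.append(x)
-- 			unsafe_negative_indices.append(x)
--
-- 		if distance < 0:
-- 			negative_distances += 1
-- 			unsafe_positive_indices.append(x)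
--
-- 		if distance > 0:
-- 			positive_distances += 1
-- 			unsafe_negative_indices.append(x)
--
-- 	# Return
-- 	if positive_distances > negative_distances:
-- 		return unsafe_positive_indices
-- 	else:
-- 		return unsafe_negative_indices
-- ===== SOURCE B (Python) =====
-- def check_levels2(report):
--     dists = [b - a for a, b in zip(report, report[1:])]
--     pos = sum(1 for d in dists if d > 0)
--     neg = sum(1 for d in dists if d < 0)
--     up = pos > neg
--     out = []
--     for x, d in enumerate(dists):
--         if d == 0 or abs(d) > 3:
--             out.append(x)
--         if (d < 0) if up else (d > 0):
--             out.append(x)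
--     return out
-- ===== Notes on version B (the rewrite author's own statement) =====
-- stated objective: simpler
-- what changed: B computes the adjacent-difference list once with zip, picks the dominant direction by counting positive vs negative steps, and then builds only the one needed index list in a single enumerate pass, instead of A's loop that maintains two parallel unsafe-index lists and discards one at the end.
import Mathlib
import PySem

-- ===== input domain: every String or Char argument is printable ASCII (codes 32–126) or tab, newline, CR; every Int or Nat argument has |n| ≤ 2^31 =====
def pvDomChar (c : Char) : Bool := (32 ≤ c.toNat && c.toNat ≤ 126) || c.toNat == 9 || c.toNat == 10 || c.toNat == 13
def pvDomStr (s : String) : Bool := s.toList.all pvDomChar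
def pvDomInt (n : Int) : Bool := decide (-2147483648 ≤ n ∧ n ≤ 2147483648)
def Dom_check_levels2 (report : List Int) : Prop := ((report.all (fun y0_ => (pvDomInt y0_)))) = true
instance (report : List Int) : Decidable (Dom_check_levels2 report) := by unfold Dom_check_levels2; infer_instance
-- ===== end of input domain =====

-- B change (one line): B builds the adjacent-difference list once, counts step directions, and then
-- collects only the dominant-direction unsafe index list in a single pass, instead of A's loop
-- maintaining two parallel index lists and discarding one at the end.

-- ===== PORT A =====
def check_levels2 (report : List Int) : List Int :=
  let s := (PySem.List.pyRange 0 ((PySem.List.len report) - 1) 1).foldl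
    (fun (s : Int × Int × List Int × List Int) x =>
      let distance := PySem.List.pyGetD report (x + 1) 0 - PySem.List.pyGetD report x 0
      let s := if distance = 0 ∨ 3 < |distance| then (s.1, s.2.1, s.2.2.1 ++ [x], s.2.2.2 ++ [x]) else s
      let s := if distance < 0 then (s.1, s.2.1 + 1, s.2.2.1 ++ [x], s.2.2.2) else s
      let s := if 0 < distance then (s.1 + 1, s.2.1, s.2.2.1, s.2.2.2 ++ [x]) else s
      s)
    (0, 0, [], [])
  if s.1 > s.2.1 then s.2.2.1 else s.2.2.2

-- ===== PORT B =====
def check_levels2_alt (report : List Int) : List Int :=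
  let dists := List.zipWith (fun a b => b - a) report (report.drop 1)
  let pos := dists.countP (fun d => decide (0 < d))
  let neg := dists.countP (fun d => decide (d < 0))
  let up := neg < pos
  (PySem.List.enumerate dists).foldl
    (fun out p =>
      let out := if p.2 = 0 ∨ 3 < |p.2| then out ++ [p.1] else out
      if (if up then p.2 < 0 else 0 < p.2) then out ++ [p.1] else out)
    []

-- ===== PRECONDITION & SPEC =====
def Spec_check_levels2 (report : List Int) (out : List Int) : Prop := out = check_levels2_alt report
instance (report : List Int) (out : List Int) : Decidable (Spec_check_levels2 report out) := by unfold Spec_check_levels2; infer_instance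

-- ===== CLAIM (what is proved, stated in full; the proofs are below) =====
def Claim_equal_check_levels2 : Prop := ∀ (report : List Int), Dom_check_levels2 report → Spec_check_levels2 report (check_levels2 report)

-- ===== LEMMAS AND PROOFS =====

def gpos (f : Int → Int) (x : Int) : List Int :=
  (if f x = 0 ∨ 3 < |f x| then [x] else []) ++ (if f x < 0 then [x] else [])

def gneg (f : Int → Int) (x : Int) : List Int :=
  (if f x = 0 ∨ 3 < |f x| then [x] else []) ++ (if 0 < f x then [x] else [])

lemma foldA (f : Int → Int) (L : List Int) (p q : Int) (u v : List Int) :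
    L.foldl (fun (s : Int × Int × List Int × List Int) x =>
      let distance := f x
      let s := if distance = 0 ∨ 3 < |distance| then (s.1, s.2.1, s.2.2.1 ++ [x], s.2.2.2 ++ [x]) else s
      let s := if distance < 0 then (s.1, s.2.1 + 1, s.2.2.1 ++ [x], s.2.2.2) else s
      let s := if 0 < distance then (s.1 + 1, s.2.1, s.2.2.1, s.2.2.2 ++ [x]) else s
      s) (p, q, u, v)
    = (p + (L.countP (fun x => decide (0 < f x)) : Int),
       q + (L.countP (fun x => decide (f x < 0)) : Int),
       u ++ L.flatMap (gpos f),
       v ++ L.flatMap (gneg f)) := by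
  induction L generalizing p q u v with
  | nil => simp
  | cons a t ih =>
    have hstep : (let distance := f a
        let s := if distance = 0 ∨ 3 < |distance| then
            ((p, q, u, v).1, (p, q, u, v).2.1, (p, q, u, v).2.2.1 ++ [a], (p, q, u, v).2.2.2 ++ [a])
          else (p, q, u, v)
        let s := if distance < 0 then (s.1, s.2.1 + 1, s.2.2.1 ++ [a], s.2.2.2) else s
        let s := if 0 < distance then (s.1 + 1, s.2.1, s.2.2.1, s.2.2.2 ++ [a]) else s
        s)
      = ((p + (if 0 < f a then 1 else 0), q + (if f a < 0 then 1 else 0),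
         u ++ gpos f a, v ++ gneg f a) : Int × Int × List Int × List Int) := by
      unfold gpos gneg
      by_cases h1 : f a = 0 ∨ 3 < |f a| <;> by_cases h2 : f a < 0 <;> by_cases h3 : 0 < f a <;>
        simp [h1, h2, h3]
    rw [List.foldl_cons, hstep, ih]
    simp only [List.countP_cons, List.flatMap_cons, Prod.mk.injEq]
    refine ⟨?_, ?_, by simp [List.append_assoc], by simp [List.append_assoc]⟩ <;>
      by_cases h2 : f a < 0 <;> by_cases h3 : 0 < f a <;> simp [h2, h3] <;> push_cast <;> ring

lemma foldB (c1 c2 : Int → Prop) [DecidablePred c1] [DecidablePred c2]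
    (L : List Int) (acc : List Int) :
    L.foldl (fun out x =>
      let out := if c1 x then out ++ [x] else out
      if c2 x then out ++ [x] else out) acc
    = acc ++ L.flatMap (fun x => (if c1 x then [x] else []) ++ (if c2 x then [x] else [])) := by
  induction L generalizing acc with
  | nil => simp
  | cons a t ih =>
    simp only [List.foldl_cons, List.flatMap_cons]
    rw [ih]
    split_ifs <;> simp [List.append_assoc]

-- ===== VERDICT (by name: the statement is the Claim_ definition above) =====
theorem check_levels2_spec : Claim_equal_check_levels2 := by
  intro report _
  unfold Spec_check_levels2 check_levels2 check_levels2_alt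
  cases report with
  | nil => decide
  | cons r0 rest =>
    dsimp only
    set rep := r0 :: rest with hrep
    set dists := List.zipWith (fun a b => b - a) rep (rep.drop 1) with hd
    have hlen : dists.length = rep.length - 1 := by
      simp [hd, List.length_zipWith]
    have hlt : dists.length < rep.length := by
      rw [hlen]; simp [hrep]
    have hbound : PySem.List.len rep - 1 = ((dists.length : Nat) : Int) := by
      rw [PySem.List.len_eq]; omega
    have key : ∀ x : Int, x ∈ PySem.List.pyRange 0 ((dists.length : Nat) : Int) 1 →
        PySem.List.pyGetD rep (x + 1) 0 - PySem.List.pyGetD rep x 0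
          = PySem.List.pyGetD dists x 0 := by
      intro x hx
      rw [PySem.List.mem_pyRange_one] at hx
      obtain ⟨hx0, hxn⟩ := hx
      have hk : x.toNat < dists.length := by omega
      have hx' : x = (x.toNat : Int) := by omega
      rw [hx']
      rw [show ((x.toNat : Int) + 1) = ((x.toNat + 1 : Nat) : Int) by push_cast; ring]
      rw [PySem.List.pyGetD_natCast, PySem.List.pyGetD_natCast, PySem.List.pyGetD_natCast]
      have h1 : x.toNat + 1 < rep.length := by omega
      have h0 : x.toNat < rep.length := by omega
      rw [List.getD_eq_getElem _ _ hk, List.getD_eq_getElem _ _ h1, List.getD_eq_getElem _ _ h0]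
      simp [hd, List.getElem_zipWith]
    rw [hbound]
    rw [PySem.List.foldl_congr_mem _ _ (fun (s : Int × Int × List Int × List Int) x =>
      let distance := PySem.List.pyGetD dists x 0
      let s := if distance = 0 ∨ 3 < |distance| then (s.1, s.2.1, s.2.2.1 ++ [x], s.2.2.2 ++ [x]) else s
      let s := if distance < 0 then (s.1, s.2.1 + 1, s.2.2.1 ++ [x], s.2.2.2) else s
      let s := if 0 < distance then (s.1 + 1, s.2.1, s.2.2.1, s.2.2.2 ++ [x]) else s
      s) _ (by intro acc x hx; simp only; rw [key x hx])]
    rw [foldA (fun j => PySem.List.pyGetD dists j 0)]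
    rw [PySem.List.enumerate_eq_map_pyRange (d := 0), List.foldl_map, PySem.List.len_eq]
    rw [foldB (fun x => PySem.List.pyGetD dists x 0 = 0 ∨ 3 < |PySem.List.pyGetD dists x 0|)
          (fun x => if dists.countP (fun d => decide (d < 0)) < dists.countP (fun d => decide (0 < d))
                    then PySem.List.pyGetD dists x 0 < 0 else 0 < PySem.List.pyGetD dists x 0)]
    have hc : ∀ p : Int → Bool,
        (PySem.List.pyRange 0 ((dists.length : Nat) : Int) 1).countP
          (fun x => p (PySem.List.pyGetD dists x 0)) = dists.countP p := by
      intro p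
      conv_rhs => rw [← PySem.List.map_pyGetD_pyRange_zero' dists 0]
      rw [List.countP_map]
      rfl
    dsimp only
    rw [hc (fun d => decide (0 < d)), hc (fun d => decide (d < 0))]
    simp only [List.nil_append]
    by_cases hup : dists.countP (fun d => decide (d < 0)) < dists.countP (fun d => decide (0 < d))
    · rw [if_pos (show (0:Int) + (dists.countP (fun d => decide (0 < d)) : Int) > 0 + (dists.countP (fun d => decide (d < 0)) : Int) by omega)]
      simp only [hup, ite_true]
      rfl
    · rw [if_neg (show ¬ ((0:Int) + (dists.countP (fun d => decide (0 < d)) : Int) > 0 + (dists.countP (fun d => decide (d < 0)) : Int)) by omega)]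
      simp only [hup, ite_false]
      rfl
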